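-- pv_equiv track=rewrite | github.com/agaballah/SerapeumAI | src/application/services/file_inspector_presentation.py | _build_ai_output
-- ===== SOURCE A (Python) =====
-- from typing import Any, Dict, List, Optional
--
-- def _build_ai_output(document: Dict[str, Any], pages: List[Dict[str, Any]]) -> str:
--     lines = [
--         "AI-generated / non-governing output only",
--         "This tab contains AI interpretation and synthesis. It does not represent certified truth by itself.",
--         "",
--     ]
--     for page in pages:
--         page_no = int(page.get("page_index") or 0) + 1
--         short = str(page.get("page_summary_short") or "").strip()
--         detailed = str(page.get("page_summary_detailed") or "").strip()
--         vg = str(page.get("vision_general") or "").strip()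
--         vd = str(page.get("vision_detailed") or "").strip()
--         vocr = str(page.get("vision_ocr_text") or "").strip()
--         if not any([short, detailed, vg, vd, vocr]):
--             continue
--         lines.append(f"--- PAGE {page_no} ---")
--         if short:
--             lines.append(f"[AI Summary] {short}")
--         if detailed:
--             lines.append(f"[AI Detailed Summary]\n{detailed}")
--         if vg:
--             lines.append(f"[AI Vision Review]\n{vg}")
--         if vd:
--             lines.append(f"[AI Detailed Vision]\n{vd}")
--         if vocr:
--             lines.append(f"[AI OCR Interpretation]\n{vocr}")
--         lines.append("")
--     if len(lines) <= 3:
--         lines.append("No AI-generated outputs have been recorded yet.")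
--     return "\n".join(lines)
-- ===== SOURCE B (Python) =====
-- def _field(page, key, label, inline):
--     v = str(page.get(key) or "").strip()
--     if not v:
--         return ""
--     return label + (" " if inline else "\n") + v + "\n"
--
--
-- def _page_text(page):
--     fields = (_field(page, "page_summary_short", "[AI Summary]", True)
--               + _field(page, "page_summary_detailed", "[AI Detailed Summary]", False)
--               + _field(page, "vision_general", "[AI Vision Review]", False)
--               + _field(page, "vision_detailed", "[AI Detailed Vision]", False)
--               + _field(page, "vision_ocr_text", "[AI OCR Interpretation]", False))
--     if not fields:
--         return ""
--     page_no = int(page.get("page_index") or 0) + 1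
--     return "--- PAGE " + str(page_no) + " ---\n" + fields + "\n"
--
--
-- def _render(pages):
--     if not pages:
--         return ""
--     return _page_text(pages[0]) + _render(pages[1:])
--
--
-- def _build_ai_output(document, pages):
--     prefix = ("AI-generated / non-governing output only\n"
--               "This tab contains AI interpretation and synthesis. "
--               "It does not represent certified truth by itself.\n\n")
--     body = _render(pages)
--     if not body:
--         return prefix + "No AI-generated outputs have been recorded yet."
--     return prefix + body[:-1]
-- ===== Notes on version B (the rewrite author's own statement) =====
-- stated objective: alternative
-- what changed: A accumulates a flat list of lines across all pages and joins it once, deciding the fallback by a len(lines) <= 3 count; B never builds a line list at all: it recursively concatenates per-page text fragments (each field rendered directly as 'label sep value\n' strings) into one body string, decides the fallback by the body string being empty, and strips the final newline with body[:-1] instead of joining with separators.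
import Mathlib
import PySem

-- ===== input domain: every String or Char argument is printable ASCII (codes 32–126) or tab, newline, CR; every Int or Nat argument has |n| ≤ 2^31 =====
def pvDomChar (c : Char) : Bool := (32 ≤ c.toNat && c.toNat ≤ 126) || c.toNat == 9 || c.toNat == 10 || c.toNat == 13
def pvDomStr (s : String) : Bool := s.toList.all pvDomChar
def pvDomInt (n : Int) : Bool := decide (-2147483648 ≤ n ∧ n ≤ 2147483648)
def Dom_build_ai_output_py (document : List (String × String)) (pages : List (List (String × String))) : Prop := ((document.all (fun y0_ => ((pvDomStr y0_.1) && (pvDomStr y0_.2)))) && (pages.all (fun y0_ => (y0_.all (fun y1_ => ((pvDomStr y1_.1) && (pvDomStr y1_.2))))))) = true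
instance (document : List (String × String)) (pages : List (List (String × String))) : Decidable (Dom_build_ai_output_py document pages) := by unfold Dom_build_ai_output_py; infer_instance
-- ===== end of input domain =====

-- B replaces A's flat accumulated line list + final join + len<=3 sentinel by a recursive
-- direct string concatenation of per-page text fragments, with an empty-body test for the fallback.
-- ===== PORT A =====
-- page.get(k): first match in the association list, None -> "" via `or`
def pvGetS (page : List (String × String)) (k : String) : String :=
  (page.lookup k).getD ""

-- int(page.get("page_index") or 0): Pre_ guarantees ofStr? succeeds when the value is non-empty
def pvPageNo (page : List (String × String)) : Int :=
  let v := pvGetS page "page_index"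
  (if v = "" then 0 else (PySem.Int.ofStr? v).getD 0) + 1

def build_ai_output_py (document : List (String × String)) (pages : List (List (String × String))) : String :=
  let lines : List String :=
    ["AI-generated / non-governing output only",
     "This tab contains AI interpretation and synthesis. It does not represent certified truth by itself.",
     ""]
  let lines := pages.foldl (fun lines page =>
    let page_no := pvPageNo page
    let short := PySem.Str.strip (pvGetS page "page_summary_short")
    let detailed := PySem.Str.strip (pvGetS page "page_summary_detailed")
    let vg := PySem.Str.strip (pvGetS page "vision_general")
    let vd := PySem.Str.strip (pvGetS page "vision_detailed")
    let vocr := PySem.Str.strip (pvGetS page "vision_ocr_text")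
    if short = "" ∧ detailed = "" ∧ vg = "" ∧ vd = "" ∧ vocr = "" then lines
    else
      let lines := lines ++ ["--- PAGE " ++ PySem.Int.toStr page_no ++ " ---"]
      let lines := if short ≠ "" then lines ++ ["[AI Summary] " ++ short] else lines
      let lines := if detailed ≠ "" then lines ++ ["[AI Detailed Summary]\n" ++ detailed] else lines
      let lines := if vg ≠ "" then lines ++ ["[AI Vision Review]\n" ++ vg] else lines
      let lines := if vd ≠ "" then lines ++ ["[AI Detailed Vision]\n" ++ vd] else lines
      let lines := if vocr ≠ "" then lines ++ ["[AI OCR Interpretation]\n" ++ vocr] else lines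
      lines ++ [""]) lines
  let lines := if lines.length ≤ 3 then lines ++ ["No AI-generated outputs have been recorded yet."] else lines
  PySem.Str.join "\n" lines

-- ===== PORT B =====
-- _field(page, key, label, inline) from Source B
def pvField (page : List (String × String)) (key label : String) (inline : Bool) : String :=
  let v := PySem.Str.strip (pvGetS page key)
  if v = "" then "" else label ++ (if inline then " " else "\n") ++ v ++ "\n"

-- _page_text(page) from Source B
def pvPageText (page : List (String × String)) : String :=
  let fields := pvField page "page_summary_short" "[AI Summary]" true
    ++ pvField page "page_summary_detailed" "[AI Detailed Summary]" false
    ++ pvField page "vision_general" "[AI Vision Review]" false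
    ++ pvField page "vision_detailed" "[AI Detailed Vision]" false
    ++ pvField page "vision_ocr_text" "[AI OCR Interpretation]" false
  if fields = "" then ""
  else "--- PAGE " ++ PySem.Int.toStr (pvPageNo page) ++ " ---\n" ++ fields ++ "\n"

-- _render(pages) from Source B: structural recursion on the page list
def pvRender : List (List (String × String)) → String
  | [] => ""
  | p :: ps => pvPageText p ++ pvRender ps

def build_ai_output_py_alt (document : List (String × String)) (pages : List (List (String × String))) : String :=
  let prefixS := "AI-generated / non-governing output only\nThis tab contains AI interpretation and synthesis. It does not represent certified truth by itself.\n\n"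
  let body := pvRender pages
  if body = "" then prefixS ++ "No AI-generated outputs have been recorded yet."
  else prefixS ++ PySem.Str.slice body none (some (-1))   -- body[:-1]

-- ===== PRECONDITION & SPEC =====
-- Pre_ excludes exactly the inputs on which Python A raises ValueError: a page whose
-- "page_index" value is a non-empty string that int() cannot parse.
def Pre_build_ai_output_py (document : List (String × String)) (pages : List (List (String × String))) : Prop :=
  ∀ page ∈ pages, ((page.lookup "page_index").getD "") = "" ∨
    (PySem.Int.ofStr? ((page.lookup "page_index").getD "")).isSome = true
instance (document : List (String × String)) (pages : List (List (String × String))) : Decidable (Pre_build_ai_output_py document pages) := by unfold Pre_build_ai_output_py; infer_instance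
def pvWitness_build_ai_output_py : (List (String × String)) × (List (List (String × String))) :=
  ([], [[("page_index", "1"), ("page_summary_short", " hi ")]])
def Spec_build_ai_output_py (document : List (String × String)) (pages : List (List (String × String))) (out : String) : Prop := out = build_ai_output_py_alt document pages
instance (document : List (String × String)) (pages : List (List (String × String))) (out : String) : Decidable (Spec_build_ai_output_py document pages out) := by unfold Spec_build_ai_output_py; infer_instance

-- ===== CLAIM (what is proved, stated in full; the proofs are below) =====
def Claim_equal_build_ai_output_py : Prop := ∀ (document : List (String × String)) (pages : List (List (String × String))), Dom_build_ai_output_py document pages → Pre_build_ai_output_py document pages → Spec_build_ai_output_py document pages (build_ai_output_py document pages)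

-- ===== LEMMAS AND PROOFS =====

-- proof-side view of the field lines of a page, in A's order
def pvFieldSpecs : List (String × String) :=
  [("page_summary_short", "[AI Summary] "),
   ("page_summary_detailed", "[AI Detailed Summary]\n"),
   ("vision_general", "[AI Vision Review]\n"),
   ("vision_detailed", "[AI Detailed Vision]\n"),
   ("vision_ocr_text", "[AI OCR Interpretation]\n")]

def pvFields (page : List (String × String)) : List String :=
  pvFieldSpecs.filterMap (fun spec =>
    let val := PySem.Str.strip (pvGetS page spec.1)
    if val ≠ "" then some (spec.2 ++ val) else none)

-- A's contribution of one page to the flat line list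
def pvSegA (page : List (String × String)) : List String :=
  if pvFields page = [] then []
  else ("--- PAGE " ++ PySem.Int.toStr (pvPageNo page) ++ " ---") :: pvFields page ++ [""]

-- each line followed by a newline, concatenated
def pvCatNL : List String → String
  | [] => ""
  | x :: xs => x ++ "\n" ++ pvCatNL xs

theorem pv_chars_join_append (sep : List Char) (xs ys : List (List Char))
    (hx : xs ≠ []) (hy : ys ≠ []) :
    PySem.Chars.join sep (xs ++ ys) = PySem.Chars.join sep xs ++ sep ++ PySem.Chars.join sep ys := by
  induction xs with
  | nil => exact absurd rfl hx
  | cons a xs ih =>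
    cases xs with
    | nil =>
      cases ys with
      | nil => exact absurd rfl hy
      | cons b ys => simp [PySem.Chars.join_cons_cons, PySem.Chars.join_singleton]
    | cons a' xs' =>
      have := ih (by simp)
      simp only [List.cons_append, PySem.Chars.join_cons_cons] at *
      simp [this, List.append_assoc]

theorem pv_str_join_append (sep : String) (xs ys : List String) (hx : xs ≠ []) (hy : ys ≠ []) :
    PySem.Str.join sep (xs ++ ys) = PySem.Str.join sep xs ++ sep ++ PySem.Str.join sep ys := by
  apply String.toList_injective
  have hx' : xs.map String.toList ≠ [] := by simpa using hx
  have hy' : ys.map String.toList ≠ [] := by simpa using hy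
  simp [PySem.Str.toList_join, pv_chars_join_append sep.toList _ _ hx' hy']

theorem pv_catNL_append (xs ys : List String) :
    pvCatNL (xs ++ ys) = pvCatNL xs ++ pvCatNL ys := by
  induction xs with
  | nil => simp [pvCatNL]
  | cons a xs ih => simp only [List.cons_append, pvCatNL, ih]; exact String.append_assoc.symm

-- join with '\n' followed by a final '\n' is the same as suffixing every line with '\n'
theorem pv_join_nl (xs : List String) (hx : xs ≠ []) :
    PySem.Str.join "\n" xs ++ "\n" = pvCatNL xs := by
  induction xs with
  | nil => exact absurd rfl hx
  | cons a xs ih =>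
    cases xs with
    | nil =>
      apply String.toList_injective
      simp [pvCatNL, PySem.Str.toList_join, PySem.Chars.join_singleton]
    | cons b xs' =>
      rw [show a :: b :: xs' = [a] ++ (b :: xs') from rfl,
          pv_str_join_append _ _ _ (by simp) (by simp), pv_catNL_append]
      have := ih (by simp)
      rw [← this]
      apply String.toList_injective
      simp [pvCatNL, PySem.Str.toList_join, PySem.Chars.join_singleton]

-- B's field-string for a page is A's field lines each suffixed with '\n'
theorem pv_fieldstr (page : List (String × String)) :
    pvField page "page_summary_short" "[AI Summary]" true
      ++ pvField page "page_summary_detailed" "[AI Detailed Summary]" false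
      ++ pvField page "vision_general" "[AI Vision Review]" false
      ++ pvField page "vision_detailed" "[AI Detailed Vision]" false
      ++ pvField page "vision_ocr_text" "[AI OCR Interpretation]" false
    = pvCatNL (pvFields page) := by
  simp only [pvField, pvFields, pvFieldSpecs, List.filterMap]
  by_cases h1 : PySem.Str.strip (pvGetS page "page_summary_short") = "" <;>
  by_cases h2 : PySem.Str.strip (pvGetS page "page_summary_detailed") = "" <;>
  by_cases h3 : PySem.Str.strip (pvGetS page "vision_general") = "" <;>
  by_cases h4 : PySem.Str.strip (pvGetS page "vision_detailed") = "" <;>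
  by_cases h5 : PySem.Str.strip (pvGetS page "vision_ocr_text") = "" <;>
  · simp only [h1, h2, h3, h4, h5, if_pos, if_neg,
      ne_eq, not_true_eq_false, not_false_eq_true]
    apply String.toList_injective
    simp [pvCatNL]

-- a non-empty field string is a non-empty string
theorem pv_catNL_ne (xs : List String) (hx : xs ≠ []) : pvCatNL xs ≠ "" := by
  cases xs with
  | nil => exact absurd rfl hx
  | cons a l =>
    intro hc
    have : (pvCatNL (a :: l)).toList = [] := by rw [hc]; rfl
    simp [pvCatNL] at this

theorem pv_pageText (page : List (String × String)) :
    pvPageText page = pvCatNL (pvSegA page) := by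
  unfold pvPageText pvSegA
  rw [pv_fieldstr]
  by_cases h : pvFields page = []
  · simp [h, pvCatNL]
  · rw [if_neg (pv_catNL_ne _ h), if_neg h]
    rw [show ("--- PAGE " ++ PySem.Int.toStr (pvPageNo page) ++ " ---") :: pvFields page ++ [""]
      = [("--- PAGE " ++ PySem.Int.toStr (pvPageNo page) ++ " ---")] ++ pvFields page ++ [""] from rfl,
      pv_catNL_append, pv_catNL_append]
    apply String.toList_injective
    simp [pvCatNL]

theorem pv_render (pages : List (List (String × String))) :
    pvRender pages = pvCatNL (pages.flatMap pvSegA) := by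
  induction pages with
  | nil => rfl
  | cons p ps ih => rw [pvRender, ih, List.flatMap_cons, pv_catNL_append, pv_pageText]

theorem pv_stepA (lines : List String) (page : List (String × String)) :
    (let page_no := pvPageNo page
     let short := PySem.Str.strip (pvGetS page "page_summary_short")
     let detailed := PySem.Str.strip (pvGetS page "page_summary_detailed")
     let vg := PySem.Str.strip (pvGetS page "vision_general")
     let vd := PySem.Str.strip (pvGetS page "vision_detailed")
     let vocr := PySem.Str.strip (pvGetS page "vision_ocr_text")
     if short = "" ∧ detailed = "" ∧ vg = "" ∧ vd = "" ∧ vocr = "" then lines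
     else
       let lines := lines ++ ["--- PAGE " ++ PySem.Int.toStr page_no ++ " ---"]
       let lines := if short ≠ "" then lines ++ ["[AI Summary] " ++ short] else lines
       let lines := if detailed ≠ "" then lines ++ ["[AI Detailed Summary]\n" ++ detailed] else lines
       let lines := if vg ≠ "" then lines ++ ["[AI Vision Review]\n" ++ vg] else lines
       let lines := if vd ≠ "" then lines ++ ["[AI Detailed Vision]\n" ++ vd] else lines
       let lines := if vocr ≠ "" then lines ++ ["[AI OCR Interpretation]\n" ++ vocr] else lines
       lines ++ [""])
    = lines ++ pvSegA page := by
  simp only [pvSegA, pvFields, pvFieldSpecs, List.filterMap]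
  by_cases h1 : PySem.Str.strip (pvGetS page "page_summary_short") = "" <;>
  by_cases h2 : PySem.Str.strip (pvGetS page "page_summary_detailed") = "" <;>
  by_cases h3 : PySem.Str.strip (pvGetS page "vision_general") = "" <;>
  by_cases h4 : PySem.Str.strip (pvGetS page "vision_detailed") = "" <;>
  by_cases h5 : PySem.Str.strip (pvGetS page "vision_ocr_text") = "" <;>
  simp [h1, h2, h3, h4, h5]

theorem pv_foldlA (pages : List (List (String × String))) (lines : List String) :
    pages.foldl (fun lines page =>
      let page_no := pvPageNo page
      let short := PySem.Str.strip (pvGetS page "page_summary_short")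
      let detailed := PySem.Str.strip (pvGetS page "page_summary_detailed")
      let vg := PySem.Str.strip (pvGetS page "vision_general")
      let vd := PySem.Str.strip (pvGetS page "vision_detailed")
      let vocr := PySem.Str.strip (pvGetS page "vision_ocr_text")
      if short = "" ∧ detailed = "" ∧ vg = "" ∧ vd = "" ∧ vocr = "" then lines
      else
        let lines := lines ++ ["--- PAGE " ++ PySem.Int.toStr page_no ++ " ---"]
        let lines := if short ≠ "" then lines ++ ["[AI Summary] " ++ short] else lines
        let lines := if detailed ≠ "" then lines ++ ["[AI Detailed Summary]\n" ++ detailed] else lines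
        let lines := if vg ≠ "" then lines ++ ["[AI Vision Review]\n" ++ vg] else lines
        let lines := if vd ≠ "" then lines ++ ["[AI Detailed Vision]\n" ++ vd] else lines
        let lines := if vocr ≠ "" then lines ++ ["[AI OCR Interpretation]\n" ++ vocr] else lines
        lines ++ [""]) lines
    = lines ++ pages.flatMap pvSegA := by
  induction pages generalizing lines with
  | nil => simp
  | cons p ps ih =>
    rw [List.foldl_cons, List.flatMap_cons, pv_stepA, ih, List.append_assoc]

-- ===== VERDICT (by name: the statement is the Claim_ definition above) =====
theorem build_ai_output_py_spec : Claim_equal_build_ai_output_py := by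
  unfold Claim_equal_build_ai_output_py
  intro document pages _ _
  unfold Spec_build_ai_output_py
  simp only [build_ai_output_py, build_ai_output_py_alt]
  rw [pv_foldlA, pv_render]
  by_cases h : pages.flatMap pvSegA = []
  · rw [h]
    simp only [List.append_nil, pvCatNL]
    rw [if_pos (by simp), if_pos trivial]
    apply String.toList_injective
    simp [PySem.Str.toList_join, PySem.Chars.join_cons_cons, PySem.Chars.join_singleton]
  · have hlen : ¬ ((["AI-generated / non-governing output only",
        "This tab contains AI interpretation and synthesis. It does not represent certified truth by itself.",
        ""] ++ pages.flatMap pvSegA).length ≤ 3) := by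
      simp only [List.length_append, List.length_cons, List.length_nil]
      have : 0 < (pages.flatMap pvSegA).length := List.length_pos_of_ne_nil h
      omega
    rw [if_neg hlen, if_neg (pv_catNL_ne _ h)]
    rw [pv_str_join_append _ _ _ (by simp) h]
    apply String.toList_injective
    have hslice : (PySem.Str.slice (pvCatNL (pages.flatMap pvSegA)) none (some (-1))).toList
        = (pvCatNL (pages.flatMap pvSegA)).toList.dropLast := PySem.Str.slice_to_neg_one _
    simp only [String.toList_append, hslice]
    rw [← pv_join_nl _ h]
    simp [PySem.Str.toList_join, PySem.Chars.join_cons_cons, PySem.Chars.join_singleton]
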